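-- pv_equiv track=rewrite | github.com/dejisec/ragmap | src/ragmap/stealth/keywords.py | _trigger_matches
-- ===== SOURCE A (Python) =====
-- def _trigger_matches(text: str, pattern: str) -> bool:
--     """Check if *pattern* matches anywhere inside *text*.
--
--     Trigger patterns use ``*`` as a wildcard that matches zero or more
--     characters (like shell globs).  The match is performed as a
--     *substring* search — the pattern does not need to cover the entire
--     text.  Splitting the pattern on ``*`` gives a list of literal
--     fragments; each fragment must appear in order inside *text*.
--     Fragments are stripped of surrounding whitespace so that patterns
--     like ``"what * documents"`` match ``"what documents do you have"``.
--     """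
--     parts = pattern.split("*")
--     parts = [p.strip() for p in parts if p.strip()]
--     if not parts:
--         return True
--     idx = 0
--     for part in parts:
--         found = text.find(part, idx)
--         if found == -1:
--             return False
--         idx = found + len(part)
--     return True
-- ===== SOURCE B (Python) =====
-- def _trigger_matches(text: str, pattern: str) -> bool:
--     parts = [p.strip() for p in pattern.split("*") if p.strip()]
--     n = len(text)
--     # reach[i] == True  <=>  the fragments not yet processed fit, in order, inside text[i:]
--     reach = [True] * (n + 1)
--     for part in reversed(parts):
--         nxt = [False] * (n + 1)
--         for i in range(n - 1, -1, -1):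
--             nxt[i] = nxt[i + 1] or (text.startswith(part, i) and reach[i + len(part)])
--         reach = nxt
--     return reach[0]
-- ===== Notes on version B (the rewrite author's own statement) =====
-- stated objective: alternative
-- what changed: A greedily advances a single index through the text with text.find, taking the leftmost occurrence of each fragment in order; B instead tabulates, for each fragment from last to first, a boolean reachability row over every text position (reach[i] = the remaining fragments fit in order inside text[i:]) and reads off entry 0.
import Mathlib
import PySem

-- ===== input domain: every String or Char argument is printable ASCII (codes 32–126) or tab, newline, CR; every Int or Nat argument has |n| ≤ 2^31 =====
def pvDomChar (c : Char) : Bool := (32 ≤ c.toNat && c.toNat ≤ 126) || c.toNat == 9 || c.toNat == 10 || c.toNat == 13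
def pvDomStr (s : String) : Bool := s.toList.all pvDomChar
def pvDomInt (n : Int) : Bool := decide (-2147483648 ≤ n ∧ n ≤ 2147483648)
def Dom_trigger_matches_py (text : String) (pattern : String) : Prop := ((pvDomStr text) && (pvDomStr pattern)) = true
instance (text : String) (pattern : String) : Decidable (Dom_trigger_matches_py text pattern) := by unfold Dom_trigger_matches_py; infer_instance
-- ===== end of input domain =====

-- B replaces A's greedy leftmost-find loop by a tabulated boolean DP: for each fragment,
-- last to first, a reachability row over all text positions; same boolean result (objective: alternative).

-- ===== PORT A =====
-- shared by both ports: both Pythons compute the fragment list with the identical comprehension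
-- '[p.strip() for p in pattern.split("*") if p.strip()]'.  split? is `some` since "*" ≠ "".
def pvParts (pattern : String) : List String :=
  (((PySem.Str.split? pattern "*").getD []).map PySem.Str.strip).filter (fun p => p != "")

-- A's 'for part in parts' loop advancing 'idx'
def pvGoA (s : List Char) : List (List Char) → Int → Bool
  | [], _ => true
  | part :: rest, idx =>
    let found := PySem.Chars.findFrom s part idx
    if found = -1 then false else pvGoA s rest (found + part.length)

def trigger_matches_py (text : String) (pattern : String) : Bool :=
  let parts := pvParts pattern
  if parts.isEmpty then true
  else pvGoA text.toList (parts.map String.toList) 0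

-- ===== PORT B =====
-- B's inner descending index loop 'for i in range(n-1,-1,-1)' building nxt from nxt[i+1]
-- is the structural recursion on the text suffix: entry i is computed from entry i+1.
-- 'text.startswith(part, i)' (0 ≤ i ≤ n) is exactly the prefix test on the suffix at i.
def pvRow (part : List Char) : List Char → List Bool → List Bool
  | [], _ => [false]
  | c :: rest, oldrow =>
      let tail := pvRow part rest (oldrow.drop 1)
      (tail.headD false || (PySem.Chars.startswith (c :: rest) part && oldrow.getD part.length false)) :: tail

def trigger_matches_py_alt (text : String) (pattern : String) : Bool :=
  let s := text.toList
  let row := (((pvParts pattern).map String.toList).reverse).foldl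
      (fun row part => pvRow part s row) (List.replicate (s.length + 1) true)
  row.headD false

-- ===== PRECONDITION & SPEC =====
def Spec_trigger_matches_py (text : String) (pattern : String) (out : Bool) : Prop := out = trigger_matches_py_alt text pattern
instance (text : String) (pattern : String) (out : Bool) : Decidable (Spec_trigger_matches_py text pattern out) := by unfold Spec_trigger_matches_py; infer_instance

-- ===== CLAIM (what is proved, stated in full; the proofs are below) =====
def Claim_equal_trigger_matches_py : Prop := ∀ (text : String) (pattern : String), Dom_trigger_matches_py text pattern → Spec_trigger_matches_py text pattern (trigger_matches_py text pattern)

-- ===== LEMMAS AND PROOFS =====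

-- fragments placed left to right from lo, each a prefix of s.drop j, ends bounded by hi
def FitsI (s : List Char) : Nat → Nat → List (List Char) → Prop
  | _, _, [] => True
  | lo, hi, f :: fs => ∃ j, lo ≤ j ∧ j + f.length ≤ hi ∧ f <+: s.drop j ∧ FitsI s (j + f.length) hi fs

-- fragments fit, in order, inside s (suffix-relative form)
def Fits (s : List Char) : List (List Char) → Prop
  | [] => True
  | f :: fs => ∃ j, f <+: s.drop j ∧ Fits (s.drop (j + f.length)) fs

theorem FitsI_mono_lo {s : List Char} {lo lo' hi : Nat} {fs : List (List Char)}
    (h : lo' ≤ lo) (hf : FitsI s lo hi fs) : FitsI s lo' hi fs := by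
  cases fs with
  | nil => trivial
  | cons f fs =>
    obtain ⟨j, h1, h2, h3, h4⟩ := hf
    exact ⟨j, le_trans h h1, h2, h3, h4⟩

theorem infix_of_prefix_drop {s f : List Char} {k j : Nat} (hk : k ≤ j)
    (h : f <+: s.drop j) : f <:+: s.drop k := by
  have : s.drop j = (s.drop k).drop (j - k) := by
    rw [List.drop_drop]; congr 1; omega
  rw [this] at h
  exact h.isInfix.trans (List.drop_suffix _ _).isInfix

-- A's forward greedy loop decides FitsI
theorem pvGoA_iff (s : List Char) (fs : List (List Char)) :
    ∀ k : Nat, k ≤ s.length → (∀ f ∈ fs, f ≠ []) →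
    (pvGoA s fs (k : Int) = true ↔ FitsI s k s.length fs) := by
  induction fs with
  | nil => intro k _ _; simp [pvGoA, FitsI]
  | cons f fs ih =>
    intro k hk hne
    have hfne : f ≠ [] := hne f (by simp)
    by_cases hfound : PySem.Chars.findFrom s f (k : Int) = -1
    · simp only [pvGoA, hfound, if_pos]
      constructor
      · intro h; cases h
      · rintro ⟨j, hkj, hjb, hpre, -⟩
        have : f <:+: s.drop k := infix_of_prefix_drop hkj hpre
        rw [PySem.Chars.findFrom_natCast_eq_neg_one_iff s f k hk] at hfound
        exact absurd this hfound
    · obtain ⟨hge, hpre0, hmin⟩ := PySem.Chars.findFrom_natCast_spec s f k hk hfound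
      set fd := PySem.Chars.findFrom s f (k : Int) with hfd
      have h0 : (0 : Int) ≤ fd := le_trans (by omega) hge
      set j0 := fd.toNat with hj0
      have hfdj : fd = (j0 : Int) := by omega
      have hkj0 : k ≤ j0 := by omega
      have hlen : f.length ≤ s.length - j0 := by
        have := hpre0.length_le
        simpa [List.length_drop] using this
      have hfpos : 0 < f.length := List.length_pos_iff.2 hfne
      have hj0b : j0 + f.length ≤ s.length := by omega
      have hstep : fd + (f.length : Int) = ((j0 + f.length : Nat) : Int) := by
        rw [hfdj]; push_cast; ring
      simp only [pvGoA, ← hfd, if_neg hfound, hstep]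
      rw [ih (j0 + f.length) hj0b (fun g hg => hne g (by simp [hg]))]
      constructor
      · intro h
        exact ⟨j0, hkj0, hj0b, hpre0, h⟩
      · rintro ⟨j, hkj, hjb, hpre, hrest⟩
        have hj0j : j0 ≤ j := by
          by_contra hc
          exact hmin j hkj (by omega) hpre
        exact FitsI_mono_lo (by omega) hrest

-- absolute-index form ↔ suffix form
theorem FitsI_iff_Fits (s : List Char) (fs : List (List Char)) (hne : ∀ f ∈ fs, f ≠ []) :
    ∀ lo, FitsI s lo s.length fs ↔ Fits (s.drop lo) fs := by
  induction fs with
  | nil => intro lo; simp [FitsI, Fits]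
  | cons f fs ih =>
    intro lo
    have hfne : f ≠ [] := hne f (by simp)
    have hfpos : 0 < f.length := List.length_pos_iff.2 hfne
    have ih' := ih (fun g hg => hne g (by simp [hg]))
    constructor
    · rintro ⟨j, h1, h2, h3, h4⟩
      refine ⟨j - lo, ?_, ?_⟩
      · have e : lo + (j - lo) = j := by omega
        rw [List.drop_drop, e]; exact h3
      · have e : lo + (j - lo + f.length) = j + f.length := by omega
        rw [List.drop_drop, e]
        exact (ih' (j + f.length)).1 h4
    · rintro ⟨j, h1, h2⟩
      rw [List.drop_drop] at h1 h2
      have hjb : lo + j + f.length ≤ s.length := by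
        have := h1.length_le
        rw [List.length_drop] at this
        omega
      refine ⟨lo + j, by omega, by omega, h1, ?_⟩
      have e : lo + (j + f.length) = lo + j + f.length := by omega
      rw [e] at h2
      exact (ih' (lo + j + f.length)).2 h2

-- row invariant: entry i says "the fragments fit inside s.drop i"
def RowOK (s : List Char) (fs : List (List Char)) (row : List Bool) : Prop :=
  row.length = s.length + 1 ∧
  ∀ i, i ≤ s.length → (row.getD i false = true ↔ Fits (s.drop i) fs)

theorem getD_drop_one (row : List Bool) (i : Nat) :
    (row.drop 1).getD i false = row.getD (i + 1) false := by
  simp [List.getD_eq_getElem?_getD]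

theorem headD_eq_getD (l : List Bool) : l.headD false = l.getD 0 false := by
  cases l <;> simp

theorem pvRow_ok (part : List Char) (hp : part ≠ []) :
    ∀ (s : List Char) (fs : List (List Char)) (oldrow : List Bool),
    RowOK s fs oldrow → RowOK s (part :: fs) (pvRow part s oldrow) := by
  intro s
  induction s with
  | nil =>
    intro fs oldrow _
    refine ⟨rfl, ?_⟩
    intro i hi
    have hi0 : i = 0 := Nat.le_zero.1 hi
    subst hi0
    constructor
    · intro h; simp [pvRow] at h
    · rintro ⟨j, h1, -⟩
      simp only [List.drop_nil] at h1
      exact absurd (List.prefix_nil.1 h1) hp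
  | cons c rest ih =>
    rintro fs oldrow ⟨hlen, hsem⟩
    have htail : RowOK rest fs (oldrow.drop 1) := by
      refine ⟨by simp [hlen], ?_⟩
      intro i hi
      rw [getD_drop_one]
      exact hsem (i + 1) (by simpa using Nat.succ_le_succ hi)
    obtain ⟨htlen, htsem⟩ := ih fs (oldrow.drop 1) htail
    constructor
    · show (pvRow part rest (oldrow.drop 1)).length + 1 = (c :: rest).length + 1
      rw [htlen]; rfl
    intro i hi
    cases i with
    | succ i =>
      show ((pvRow part rest (oldrow.drop 1)).getD i false = true) ↔ _
      rw [htsem i (by simpa using hi)]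
      rfl
    | zero =>
      show ((pvRow part rest (oldrow.drop 1)).headD false
          || (PySem.Chars.startswith (c :: rest) part && oldrow.getD part.length false)) = true ↔ _
      rw [Bool.or_eq_true, Bool.and_eq_true, PySem.Chars.startswith_iff]
      have hhead := headD_eq_getD (pvRow part rest (oldrow.drop 1))
      constructor
      · rintro (h | ⟨hpre, hrec⟩)
        · rw [hhead, htsem 0 (Nat.zero_le _)] at h
          obtain ⟨j, h1, h2⟩ := h
          simp only [List.drop_zero] at h1 h2 ⊢
          refine ⟨j + 1, ?_, ?_⟩
          · rw [List.drop_succ_cons]; exact h1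
          · have e : j + 1 + part.length = j + part.length + 1 := by omega
            rw [e, List.drop_succ_cons]; exact h2
        · have hplen : part.length ≤ rest.length + 1 := by
            have := List.IsPrefix.length_le hpre
            simpa using this
          rw [hsem part.length (by simpa using hplen)] at hrec
          exact ⟨0, by simpa using hpre, by simpa using hrec⟩
      · rintro ⟨j, h1, h2⟩
        cases j with
        | zero =>
          right
          have hpre : part <+: c :: rest := by simpa using h1
          have hplen : part.length ≤ rest.length + 1 := by
            have := List.IsPrefix.length_le hpre
            simpa using this
          refine ⟨hpre, ?_⟩
          rw [hsem part.length (by simpa using hplen)]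
          simpa using h2
        | succ j =>
          left
          rw [hhead, htsem 0 (Nat.zero_le _)]
          simp only [List.drop_zero] at h1 h2 ⊢
          rw [List.drop_succ_cons] at h1
          have e : j + 1 + part.length = j + part.length + 1 := by omega
          rw [e, List.drop_succ_cons] at h2
          exact ⟨j, h1, h2⟩

theorem foldl_rows_ok (s : List Char) :
    ∀ (l : List (List Char)) (fs : List (List Char)) (row : List Bool),
    (∀ f ∈ l, f ≠ []) → RowOK s fs row →
    RowOK s (l.reverse ++ fs) (l.foldl (fun row part => pvRow part s row) row) := by
  intro l
  induction l with
  | nil => intro fs row _ h; simpa using h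
  | cons f l ih =>
    intro fs row hne h
    have h1 : RowOK s (f :: fs) (pvRow f s row) := pvRow_ok f (hne f (by simp)) s fs row h
    have h2 := ih (f :: fs) (pvRow f s row) (fun g hg => hne g (by simp [hg])) h1
    simpa [List.foldl_cons, List.append_assoc] using h2

theorem replicate_RowOK (s : List Char) : RowOK s [] (List.replicate (s.length + 1) true) := by
  refine ⟨by simp, ?_⟩
  intro i hi
  have h : (List.replicate (s.length + 1) true).getD i false = true := by
    simp [List.getD_eq_getElem?_getD, Nat.lt_succ_of_le hi]
  rw [h]
  simp [Fits]

theorem pvParts_ne_nil (pattern : String) : ∀ f ∈ (pvParts pattern).map String.toList, f ≠ [] := by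
  intro f hf
  simp only [List.mem_map] at hf
  obtain ⟨p, hp, rfl⟩ := hf
  have := List.of_mem_filter hp
  simp only [bne_iff_ne, ne_eq] at this
  simpa [String.toList_eq_nil_iff] using this

-- ===== VERDICT (by name: the statement is the Claim_ definition above) =====
theorem trigger_matches_py_spec : Claim_equal_trigger_matches_py := by
  intro text pattern _
  unfold Spec_trigger_matches_py trigger_matches_py trigger_matches_py_alt
  have hne := pvParts_ne_nil pattern
  have hrows := foldl_rows_ok text.toList ((pvParts pattern).map String.toList).reverse []
      (List.replicate (text.toList.length + 1) true)
      (fun f hf => hne f (List.mem_reverse.1 hf)) (replicate_RowOK text.toList)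
  rw [List.reverse_reverse, List.append_nil] at hrows
  obtain ⟨-, hrsem⟩ := hrows
  show (if (pvParts pattern).isEmpty then true
        else pvGoA text.toList ((pvParts pattern).map String.toList) 0)
      = (((pvParts pattern).map String.toList).reverse.foldl
          (fun row part => pvRow part text.toList row)
          (List.replicate (text.toList.length + 1) true)).headD false
  rw [headD_eq_getD]
  by_cases hemp : (pvParts pattern).isEmpty
  · have hnil : pvParts pattern = [] := List.isEmpty_iff.1 hemp
    rw [if_pos hemp]
    simp [hnil, List.replicate_succ]
  · rw [if_neg hemp, Bool.eq_iff_iff, hrsem 0 (Nat.zero_le _), List.drop_zero]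
    have hA := pvGoA_iff text.toList ((pvParts pattern).map String.toList) 0 (Nat.zero_le _) hne
    rw [FitsI_iff_Fits _ _ hne 0, List.drop_zero] at hA
    simpa using hA
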